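-- pv_equiv track=rewrite | github.com/zachary62/cloudFAHES | cgi-bin/patterns.py | remove_enclosing
-- ===== SOURCE A (Python) =====
-- def remove_enclosing(pttrn):
--     new_pttrn = []
--     if(check_enclosing(pttrn)):
--         for i in range(len(pttrn)):
--             if(pttrn[i][0] != ENCLOSE):
--                 new_pttrn.append(pttrn[i])
--         return new_pttrn
--     return pttrn
--
-- def check_enclosing(pttrn):
--     count = 0
--     for i in range(len(pttrn)):
--         if(pttrn[i][0] == ENCLOSE):
--             count = count + 1
--     # check even or odd
--     if count & 1 and count > 0:
--         return False
--     else: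
--         return True
--
-- ENCLOSE='e'
-- ===== SOURCE B (Python) =====
-- ENCLOSE='e'
--
-- def remove_enclosing(pttrn):
--     # Single fused pass: count enclosing elements and build the filtered list together.
--     count = 0
--     kept = []
--     for x in pttrn:
--         if x[0] == ENCLOSE:
--             count += 1
--         else:
--             kept.append(x)
--     return pttrn if count & 1 else kept
-- ===== Notes on version B (the rewrite author's own statement) =====
-- stated objective: simpler
-- what changed: B fuses A's two traversals (a counting pass inside check_enclosing, then a separate filtering pass) into one loop that simultaneously counts enclosing-marked elements and builds the kept list, deciding at the end.
import Mathlib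
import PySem

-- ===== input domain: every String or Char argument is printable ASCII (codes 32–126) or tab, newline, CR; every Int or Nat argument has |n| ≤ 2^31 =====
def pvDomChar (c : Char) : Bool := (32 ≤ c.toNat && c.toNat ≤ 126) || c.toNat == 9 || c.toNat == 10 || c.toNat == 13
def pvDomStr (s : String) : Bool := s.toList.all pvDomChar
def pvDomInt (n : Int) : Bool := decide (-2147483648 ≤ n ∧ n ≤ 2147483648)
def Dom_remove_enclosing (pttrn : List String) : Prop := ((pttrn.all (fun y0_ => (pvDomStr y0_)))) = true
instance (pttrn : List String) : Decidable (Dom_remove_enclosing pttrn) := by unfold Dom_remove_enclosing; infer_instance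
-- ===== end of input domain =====

-- B fuses A's two passes (count, then filter) into one loop; equivalence for the return value.

-- ===== PORT A =====
-- x[0] is ported as PySem.Str.pyGet? x 0 (none = IndexError on the empty string; Pre_ excludes those)
def check_enclosing (pttrn : List String) : Bool :=
  let count : Nat := pttrn.foldl (fun c s => if PySem.Str.pyGet? s 0 = some 'e' then c + 1 else c) 0
  if count % 2 = 1 ∧ count > 0 then false else true

def remove_enclosing (pttrn : List String) : List String :=
  if check_enclosing pttrn then
    pttrn.foldl (fun acc s => if ¬ (PySem.Str.pyGet? s 0 = some 'e') then acc ++ [s] else acc) []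
  else pttrn

-- ===== PORT B =====
def remove_enclosing_alt (pttrn : List String) : List String :=
  let r : Nat × List String :=
    pttrn.foldl (fun p s =>
      if PySem.Str.pyGet? s 0 = some 'e' then (p.1 + 1, p.2) else (p.1, p.2 ++ [s])) (0, [])
  if r.1 % 2 = 1 then pttrn else r.2

-- ===== PRECONDITION & SPEC =====
-- Pre_ excludes lists containing an empty string, where Python A raises IndexError on x[0].
def Pre_remove_enclosing (pttrn : List String) : Prop := ∀ s ∈ pttrn, s ≠ ""
instance (pttrn : List String) : Decidable (Pre_remove_enclosing pttrn) := by unfold Pre_remove_enclosing; infer_instance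
def pvWitness_remove_enclosing : List String := ["ea", "ab", "eb"]

def Spec_remove_enclosing (pttrn : List String) (out : List String) : Prop := out = remove_enclosing_alt pttrn
instance (pttrn : List String) (out : List String) : Decidable (Spec_remove_enclosing pttrn out) := by unfold Spec_remove_enclosing; infer_instance

-- ===== CLAIM (what is proved, stated in full; the proofs are below) =====
def Claim_equal_remove_enclosing : Prop := ∀ (pttrn : List String), Dom_remove_enclosing pttrn → Pre_remove_enclosing pttrn → Spec_remove_enclosing pttrn (remove_enclosing pttrn)

-- ===== LEMMAS AND PROOFS =====

-- B's fused fold computes exactly A's two folds, pairwise.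
theorem fused_eq (l : List String) (c : Nat) (acc : List String) :
    l.foldl (fun p s =>
      if PySem.Str.pyGet? s 0 = some 'e' then (p.1 + 1, p.2) else (p.1, p.2 ++ [s])) (c, acc)
    = (l.foldl (fun c s => if PySem.Str.pyGet? s 0 = some 'e' then c + 1 else c) c,
       l.foldl (fun acc s => if ¬ (PySem.Str.pyGet? s 0 = some 'e') then acc ++ [s] else acc) acc) := by
  induction l generalizing c acc with
  | nil => rfl
  | cons x xs ih =>
    simp only [List.foldl]
    by_cases h : PySem.Str.pyGet? x 0 = some 'e'
    · simp only [if_pos h, if_neg (not_not_intro h), ih]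
    · simp only [if_neg h, if_pos h, ih]

-- ===== VERDICT (by name: the statement is the Claim_ definition above) =====
theorem remove_enclosing_spec : Claim_equal_remove_enclosing := by
  intro pttrn _ _
  unfold Spec_remove_enclosing remove_enclosing remove_enclosing_alt check_enclosing
  simp only [fused_eq]
  set cnt := pttrn.foldl (fun c s => if PySem.Str.pyGet? s 0 = some 'e' then c + 1 else c) (0 : Nat)
  by_cases h : cnt % 2 = 1
  · have : cnt > 0 := by omega
    simp [h, this]
  · simp [h]
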